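-- pv_equiv track=rewrite | github.com/janickspirig/fund_recommender | src/if_recomender/validation/raw/data_validator.py | _line_has_odd_quotes
-- ===== SOURCE A (Python) =====
-- def _line_has_odd_quotes(line: str) -> bool:
--     """Check if any field in the line has an ODD number of unescaped quotes.
--
--     Args:
--         line: A single CSV line
--
--     Returns:
--         True if any field has odd unescaped quote count
--     """
--     if '"' not in line:
--         return False
--
--     fields = line.split(";")
--     for field in fields:
--         cleaned_field = field.replace('""', "")
--         quote_count = cleaned_field.count('"')
--         if quote_count % 2 == 1:
--             return True
--
--     return False
-- ===== SOURCE B (Python) =====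
-- def _line_has_odd_quotes(line: str) -> bool:
--     # Single streaming scan: track the parity of quotes in the current field.
--     # Removing escaped quote pairs ("") never changes parity, so toggling on
--     # every quote gives the same per-field odd/even answer as A.
--     odd = False
--     for ch in line:
--         if ch == '"':
--             odd = not odd
--         elif ch == ';':
--             if odd:
--                 return True
--             odd = False
--     return odd
-- ===== Notes on version B (the rewrite author's own statement) =====
-- stated objective: alternative
-- what changed: Replaced the split-into-fields plus per-field escaped-pair-removal and quote-count passes with a single character-by-character scan that keeps one quote-parity bit per field (parity is invariant under removing escaped quote pairs), trading C-implemented str methods for a streaming state machine.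
import Mathlib
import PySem

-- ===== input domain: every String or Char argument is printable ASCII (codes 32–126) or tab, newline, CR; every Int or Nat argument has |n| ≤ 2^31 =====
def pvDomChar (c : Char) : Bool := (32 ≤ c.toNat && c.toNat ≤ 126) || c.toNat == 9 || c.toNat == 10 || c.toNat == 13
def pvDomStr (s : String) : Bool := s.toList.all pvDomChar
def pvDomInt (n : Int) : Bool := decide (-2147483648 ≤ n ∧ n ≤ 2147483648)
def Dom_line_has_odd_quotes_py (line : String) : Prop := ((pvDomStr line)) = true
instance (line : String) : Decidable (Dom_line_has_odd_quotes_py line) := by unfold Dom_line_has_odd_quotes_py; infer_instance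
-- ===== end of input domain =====

-- B replaces A's split/replace/count field decomposition by one streaming quote-parity scan over the characters (alternative decomposition, same O(n) cost).

-- ===== PORT A =====
-- field.replace('""','').count('"') % 2 == 1
def pvA_fieldOdd (field : List Char) : Bool :=
  PySem.Chars.count (PySem.Chars.replace field ['"', '"'] []) ['"'] % 2 == 1

-- the for-loop over fields with early return True
def pvA_loop : List (List Char) → Bool
  | [] => false
  | f :: rest => if pvA_fieldOdd f then true else pvA_loop rest

def line_has_odd_quotes_py (line : String) : Bool :=
  if PySem.Str.isIn "\"" line = false then false
  else pvA_loop (PySem.Chars.splitOn line.toList [';'])  -- line.split(";"), sep ≠ ""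

-- ===== PORT B =====
def pvB_scan : List Char → Bool → Bool
  | [], odd => odd
  | c :: rest, odd =>
    if c = '"' then pvB_scan rest (!odd)
    else if c = ';' then (if odd then true else pvB_scan rest false)
    else pvB_scan rest odd

def line_has_odd_quotes_py_alt (line : String) : Bool :=
  pvB_scan line.toList false

-- ===== PRECONDITION & SPEC =====
def Spec_line_has_odd_quotes_py (line : String) (out : Bool) : Prop := out = line_has_odd_quotes_py_alt line
instance (line : String) (out : Bool) : Decidable (Spec_line_has_odd_quotes_py line out) := by unfold Spec_line_has_odd_quotes_py; infer_instance

-- ===== CLAIM (what is proved, stated in full; the proofs are below) =====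
def Claim_equal_line_has_odd_quotes_py : Prop := ∀ (line : String), Dom_line_has_odd_quotes_py line → Spec_line_has_odd_quotes_py line (line_has_odd_quotes_py line)

-- ===== LEMMAS AND PROOFS =====

-- reference splitter: split on ';' with current (reversed) field cur
def pvSplitSemi : List Char → List Char → List (List Char)
  | [], cur => [cur.reverse]
  | c :: rest, cur => if c = ';' then cur.reverse :: pvSplitSemi rest [] else pvSplitSemi rest (c :: cur)

-- count of the single-char pattern ['"'] is List.count
theorem pv_count_go (l : List Char) : ∀ (fuel acc : Nat), l.length ≤ fuel →
    PySem.Chars.count.go ['"'] fuel l acc = acc + l.count '"' := by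
  induction l with
  | nil => intro fuel acc _; cases fuel <;> simp [PySem.Chars.count.go]
  | cons c t ih =>
    intro fuel acc h
    cases fuel with
    | zero => simp at h
    | succ n =>
      by_cases hc : c = '"'
      · subst hc
        simp [PySem.Chars.count.go, List.isPrefixOf, ih n (acc + 1) (by simpa using h)]
        omega
      · simp [PySem.Chars.count.go, List.isPrefixOf, hc, Ne.symm hc,
          ih n acc (by simpa using h)]

-- replace('""','') preserves quote-count parity
theorem pv_replace_go_parity (fuel : Nat) : ∀ (l acc : List Char), l.length ≤ fuel →
    (PySem.Chars.replace.go ['"', '"'] [] fuel l acc).count '"' % 2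
      = (acc.count '"' + l.count '"') % 2 := by
  induction fuel with
  | zero =>
    intro l acc h
    have : l = [] := List.length_eq_zero_iff.mp (Nat.le_zero.mp h)
    subst this
    simp [PySem.Chars.replace.go]
  | succ n ih =>
    intro l acc h
    match l with
    | [] => simp [PySem.Chars.replace.go]
    | c :: t =>
      by_cases hp : (['"', '"'] : List Char).isPrefixOf (c :: t) = true
      · match t with
        | [] => simp [List.isPrefixOf] at hp
        | d :: t' =>
          have hc : c = '"' := by
            have := hp; simp [List.isPrefixOf] at this; exact this.1.symm
          have hd : d = '"' := by
            have := hp; simp [List.isPrefixOf] at this; exact this.2.symm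
          subst hc; subst hd
          simp only [PySem.Chars.replace.go, hp, if_pos, List.length_cons,
            List.drop_succ_cons, List.length_nil, List.drop_zero, List.reverse_nil, List.nil_append]
          rw [ih t' acc (by simp at h; omega)]
          simp
          omega
      · simp only [PySem.Chars.replace.go, hp, if_neg, Bool.not_eq_true]
        rw [ih t (c :: acc) (by simpa using h)]
        simp [List.count_cons]
        omega

theorem pv_fieldOdd_eq (f : List Char) : pvA_fieldOdd f = decide (f.count '"' % 2 = 1) := by
  unfold pvA_fieldOdd
  unfold PySem.Chars.count
  simp only [List.isEmpty_cons, if_neg, Bool.false_eq_true, not_false_iff]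
  rw [pv_count_go _ _ _ (le_refl _)]
  unfold PySem.Chars.replace
  simp only [List.isEmpty_cons, if_neg, Bool.false_eq_true, not_false_iff]
  have := pv_replace_go_parity f.length f [] (le_refl _)
  simp only [List.count_nil, Nat.zero_add] at this
  rw [Nat.zero_add, this]
  by_cases h1 : List.count '"' f % 2 = 1 <;> simp [h1]

-- splitOn.go with single-char sep equals the reference splitter
theorem pv_splitOn_go_eq (l : List Char) : ∀ (fuel : Nat) (cur : List Char) (acc : List (List Char)),
    l.length ≤ fuel →
    PySem.Chars.splitOn.go [';'] fuel l cur acc = acc.reverse ++ pvSplitSemi l cur := by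
  induction l with
  | nil =>
    intro fuel cur acc _
    cases fuel <;> simp [PySem.Chars.splitOn.go, pvSplitSemi]
  | cons c t ih =>
    intro fuel cur acc h
    cases fuel with
    | zero => simp at h
    | succ n =>
      by_cases hc : c = ';'
      · subst hc
        simp only [PySem.Chars.splitOn.go, List.isPrefixOf, BEq.rfl, Bool.true_and,
          if_pos, List.length_cons, List.drop_succ_cons, List.length_nil, List.drop_zero]
        rw [ih n [] (cur.reverse :: acc) (by simpa using h)]
        simp [pvSplitSemi]
      · have hb : ((';' : Char) == c) = false := by simp [Ne.symm hc]
        simp only [PySem.Chars.splitOn.go, List.isPrefixOf, hb, Bool.false_and,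
          Bool.false_eq_true, if_neg, not_false_iff]
        rw [ih n (c :: cur) acc (by simpa using h)]
        simp [pvSplitSemi, hc]

-- the A-loop over the reference split equals B's scan
theorem pv_loop_eq_scan (l : List Char) : ∀ (cur : List Char),
    pvA_loop (pvSplitSemi l cur) = pvB_scan l (decide (cur.count '"' % 2 = 1)) := by
  induction l with
  | nil =>
    intro cur
    simp [pvSplitSemi, pvA_loop, pvB_scan, pv_fieldOdd_eq]
  | cons c t ih =>
    intro cur
    by_cases hq : c = '"'
    · subst hq
      have hflip : decide (('"' :: cur).count '"' % 2 = 1)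
          = !decide (cur.count '"' % 2 = 1) := by
        rcases Nat.mod_two_eq_zero_or_one (cur.count '"') with h | h <;>
          simp [Nat.add_mod, h]
      rw [show pvSplitSemi ('"' :: t) cur = pvSplitSemi t ('"' :: cur) by simp [pvSplitSemi],
        ih ('"' :: cur), hflip]
      simp [pvB_scan]
    · by_cases hs : c = ';'
      · subst hs
        rw [show pvSplitSemi (';' :: t) cur = cur.reverse :: pvSplitSemi t [] by
          simp [pvSplitSemi]]
        by_cases ho : cur.count '"' % 2 = 1
        · simp [pvA_loop, pvB_scan, pv_fieldOdd_eq, ho]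
        · simp [pvA_loop, pvB_scan, pv_fieldOdd_eq, ho, ih]
      · have hcnt : decide ((c :: cur).count '"' % 2 = 1)
            = decide (cur.count '"' % 2 = 1) := by
          simp [hq]
        rw [show pvSplitSemi (c :: t) cur = pvSplitSemi t (c :: cur) by simp [pvSplitSemi, hs],
          ih (c :: cur), hcnt]
        simp [pvB_scan, hq, hs]

-- if the line has no quote, B's scan returns false
theorem pv_scan_no_quote (l : List Char) (h : '"' ∉ l) : pvB_scan l false = false := by
  induction l with
  | nil => simp [pvB_scan]
  | cons c t ih =>
    simp only [List.mem_cons, not_or] at h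
    have hq : c ≠ '"' := fun hc => h.1 hc.symm
    by_cases hs : c = ';' <;> simp [pvB_scan, hq, hs, ih h.2]

-- ===== VERDICT (by name: the statement is the Claim_ definition above) =====
theorem line_has_odd_quotes_py_spec : Claim_equal_line_has_odd_quotes_py := by
  intro line _
  unfold Spec_line_has_odd_quotes_py line_has_odd_quotes_py line_has_odd_quotes_py_alt
  by_cases hq : PySem.Str.isIn "\"" line = false
  · rw [if_pos hq]
    have hnin : '"' ∉ line.toList := by
      intro hmem
      have htrue : PySem.Str.isIn "\"" line = true := by
        rw [PySem.Str.isIn_eq, PySem.Chars.isIn_iff_infix]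
        obtain ⟨l₁, l₂, hl⟩ := List.append_of_mem hmem
        exact ⟨l₁, l₂, by simp [hl]⟩
      rw [htrue] at hq
      exact Bool.true_eq_false.mp hq
    exact (pv_scan_no_quote _ hnin).symm
  · rw [if_neg hq]
    unfold PySem.Chars.splitOn
    rw [pv_splitOn_go_eq _ _ _ _ (by omega)]
    simpa using pv_loop_eq_scan line.toList []
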